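-- pv_equiv track=rewrite | github.com/p-lots/codewars | 7-kyu/simple-fun-#87--shuffled-array/python/solution.py | shuffled_array
-- ===== SOURCE A (Python) =====
-- def shuffled_array(s):
--     s.sort()
--     for i in range(len(s)):
--         curr_total = sum(s[:i] + s[i + 1:])
--         s_copy = [n for n in s]
--         if curr_total in s_copy:
--             idx = s_copy.index(curr_total)
--             del s_copy[idx]
--             if curr_total == sum(s_copy):
--                 return s_copy
-- ===== SOURCE B (Python) =====
-- def shuffled_array(s):
--     total = sum(s)
--     if total % 2 == 0:
--         half = total // 2
--         if half in s:
--             res = sorted(s)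
--             res.remove(half)
--             return res
--     return None
-- ===== Notes on version B (the rewrite author's own statement) =====
-- stated objective: faster
-- what changed: B computes the total once and removes total/2 directly from a sorted copy (one membership test + one sort), instead of A's per-index loop that re-sums two slices and copies the whole list at every iteration; equivalence is about the return value only (A additionally sorts its argument in place).
import Mathlib
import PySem

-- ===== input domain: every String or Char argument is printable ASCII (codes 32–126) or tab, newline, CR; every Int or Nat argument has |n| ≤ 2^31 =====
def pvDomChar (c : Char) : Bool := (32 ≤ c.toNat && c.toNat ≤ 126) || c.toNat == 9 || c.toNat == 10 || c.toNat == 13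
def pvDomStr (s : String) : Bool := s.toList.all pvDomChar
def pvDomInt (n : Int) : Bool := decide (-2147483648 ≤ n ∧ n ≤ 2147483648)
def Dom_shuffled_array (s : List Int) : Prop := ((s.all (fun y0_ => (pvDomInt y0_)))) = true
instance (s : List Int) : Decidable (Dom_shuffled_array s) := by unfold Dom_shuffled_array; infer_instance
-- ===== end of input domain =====

-- B computes the total once and removes total/2 from a sorted copy, instead of A's per-index loop that
-- re-sums two slices and copies the list each iteration; equivalence is about the RETURN value only —
-- A also sorts its argument in place, B does not.

-- ===== PORT A =====
-- the 'for i in range(len(s))' loop body, recursing on the remaining index list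
def shuffledLoopA (t : List Int) : List Int → Option (List Int)
  | [] => none
  | i :: is =>
    -- curr_total = sum(s[:i] + s[i + 1:])
    let curr := (PySem.List.slice t none (some i) ++ PySem.List.slice t (some (i + 1)) none).sum
    -- s_copy = [n for n in s]  (a copy of the sorted list t)
    if t.contains curr then
      match PySem.List.index? t curr with   -- idx = s_copy.index(curr_total)
      | some idx =>
        let s_copy := t.eraseIdx idx        -- del s_copy[idx]
        if curr = s_copy.sum then some s_copy else shuffledLoopA t is
      | none => shuffledLoopA t is          -- unreachable: contains curr is true here
    else shuffledLoopA t is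

def shuffled_array (s : List Int) : Option (List Int) :=
  let t := PySem.List.sorted s (fun x => x) false      -- s.sort()
  shuffledLoopA t (PySem.List.pyRange 0 t.length 1)    -- for i in range(len(s)): ...

-- ===== PORT B =====
def shuffled_array_alt (s : List Int) : Option (List Int) :=
  let total := s.sum
  if PySem.Int.mod total 2 = 0 then
    let half := PySem.Int.floordiv total 2
    if s.contains half then
      PySem.List.remove? (PySem.List.sorted s (fun x => x) false) half   -- res.remove(half)
    else none
  else none

-- ===== PRECONDITION & SPEC =====
def Spec_shuffled_array (s : List Int) (out : Option (List Int)) : Prop := out = shuffled_array_alt s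
instance (s : List Int) (out : Option (List Int)) : Decidable (Spec_shuffled_array s out) := by unfold Spec_shuffled_array; infer_instance

-- ===== CLAIM (what is proved, stated in full; the proofs are below) =====
def Claim_equal_shuffled_array : Prop := ∀ (s : List Int), Dom_shuffled_array s → Spec_shuffled_array s (shuffled_array s)

-- ===== LEMMAS AND PROOFS =====

-- sum of the two slices around index k is the total minus the element at k
theorem pv_slice_sum (t : List Int) (k : Nat) (hk : k < t.length) :
    (PySem.List.slice t none (some (k : Int)) ++ PySem.List.slice t (some ((k : Int) + 1)) none).sum
      = t.sum - t[k] := by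
  have h1 : PySem.List.slice t none (some (k : Int)) = t.take k := by
    simp [PySem.List.slice_to_natCast]
  have h2 : PySem.List.slice t (some ((k : Int) + 1)) none = t.drop (k + 1) := by
    have := PySem.List.slice_from_natCast t (k + 1)
    simpa using this
  rw [h1, h2, List.sum_append]
  have hd : t.drop k = t[k] :: t.drop (k + 1) := List.drop_eq_getElem_cons hk
  have h3 : t.sum = (t.take k).sum + (t.drop k).sum := by
    rw [← List.sum_append, List.take_append_drop]
  rw [hd, List.sum_cons] at h3
  omega

-- sum after erasing one occurrence of a member
theorem pv_erase_sum (t : List Int) (c : Int) (hc : c ∈ t) : (t.erase c).sum = t.sum - c := by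
  have h := (List.perm_cons_erase hc).sum_eq
  rw [List.sum_cons] at h
  omega

-- deleting at the index found by .index is erasing the first occurrence
theorem pv_eraseIdx_index (t : List Int) (c : Int) (idx : Nat)
    (h : PySem.List.index? t c = some idx) : t.eraseIdx idx = t.erase c := by
  rw [PySem.List.index?_eq_idxOf?] at h
  rw [List.erase_eq_eraseIdx, h]

-- one loop iteration at an in-range index: it succeeds iff the element there is half the total
theorem pv_loop_step (t : List Int) (k : Nat) (hk : k < t.length) (is : List Int) :
    shuffledLoopA t ((k : Int) :: is)
      = if 2 * t[k] = t.sum then some (t.erase t[k]) else shuffledLoopA t is := by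
  have hcurr := pv_slice_sum t k hk
  simp only [shuffledLoopA]
  rw [hcurr]
  by_cases h2 : 2 * t[k] = t.sum
  · have hct : t.sum - t[k] = t[k] := by omega
    rw [hct]
    have hmem : t[k] ∈ t := List.getElem_mem hk
    rw [if_pos (by simp [hmem])]
    obtain ⟨idx, hidx⟩ := Option.isSome_iff_exists.mp ((PySem.List.index?_isSome_iff t _).mpr hmem)
    rw [hidx]
    simp only [pv_eraseIdx_index t _ idx hidx]
    rw [if_pos (by rw [pv_erase_sum t _ hmem]; omega), if_pos h2]
  · rw [if_neg h2]
    by_cases hmem : t.sum - t[k] ∈ t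
    · rw [if_pos (by simpa using hmem)]
      obtain ⟨idx, hidx⟩ := Option.isSome_iff_exists.mp ((PySem.List.index?_isSome_iff t _).mpr hmem)
      rw [hidx]
      simp only [pv_eraseIdx_index t _ idx hidx]
      rw [if_neg (by rw [pv_erase_sum t _ hmem]; omega)]
    · rw [if_neg (by simpa using hmem)]

-- if no element is half the total, every iteration fails
theorem pv_loop_none (t : List Int) (hno : ∀ x ∈ t, 2 * x ≠ t.sum) :
    ∀ is : List Int, (∀ i ∈ is, 0 ≤ i ∧ i < (t.length : Int)) → shuffledLoopA t is = none := by
  intro is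
  induction is with
  | nil => intro _; rfl
  | cons i is ih =>
    intro hb
    obtain ⟨h0, hlt⟩ := hb i (List.mem_cons_self)
    have hi : i = ((i.toNat : Nat) : Int) := (Int.toNat_of_nonneg h0).symm
    have hk : i.toNat < t.length := by omega
    rw [hi, pv_loop_step t i.toNat hk is,
      if_neg (hno _ (List.getElem_mem hk))]
    exact ih (fun j hj => hb j (List.mem_cons_of_mem _ hj))

-- if c = total/2 occurs in the tail from a, the loop over indices a.. returns t with c erased
theorem pv_loop_found (t : List Int) (c : Int) (hc : 2 * c = t.sum) :
    ∀ a : Nat, c ∈ t.drop a →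
      shuffledLoopA t (PySem.List.pyRange (a : Int) (t.length : Int) 1) = some (t.erase c) := by
  have key : ∀ n, ∀ a : Nat, t.length - a = n → c ∈ t.drop a →
      shuffledLoopA t (PySem.List.pyRange (a : Int) (t.length : Int) 1) = some (t.erase c) := by
    intro n
    induction n with
    | zero =>
      intro a hn hmem
      rw [List.drop_eq_nil_of_le (by omega)] at hmem
      exact absurd hmem (List.not_mem_nil)
    | succ n ih =>
      intro a hn hmem
      have ha : a < t.length := by omega
      rw [PySem.List.pyRange_one_cons (by exact_mod_cast ha),
        pv_loop_step t a ha]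
      by_cases he : t[a] = c
      · rw [if_pos (by rw [he]; exact hc), he]
      · have hne : 2 * t[a] ≠ t.sum := by
          intro h; exact he (by omega)
        rw [if_neg hne]
        have hmem' : c ∈ t.drop (a + 1) := by
          rw [List.drop_eq_getElem_cons ha] at hmem
          rcases List.mem_cons.mp hmem with h | h
          · exact absurd h.symm he
          · exact h
        have := ih (a + 1) (by omega) hmem'
        rw [← this]
        norm_num
  intro a hmem
  exact key (t.length - a) a rfl hmem

-- ===== VERDICT (by name: the statement is the Claim_ definition above) =====
theorem shuffled_array_spec : Claim_equal_shuffled_array := by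
  intro s _
  unfold Spec_shuffled_array shuffled_array shuffled_array_alt
  simp only
  set t := PySem.List.sorted s (fun x => x) false with ht
  have hperm : t.Perm s := PySem.List.sorted_perm s (fun x => x) false
  have hsum : t.sum = s.sum := hperm.sum_eq
  by_cases heven : PySem.Int.mod s.sum 2 = 0
  · set half := PySem.Int.floordiv s.sum 2 with hhalf
    have hdvd : (2 : Int) ∣ s.sum := (PySem.Int.mod_eq_zero_iff_dvd _ _).mp heven
    have h2 : 2 * half = s.sum := by
      obtain ⟨q, hq⟩ := hdvd
      have : half = q := by
        rw [hhalf, hq, PySem.Int.floordiv_eq_ediv_of_pos (by norm_num)]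
        exact Int.mul_ediv_cancel_left q (by norm_num)
      omega
    by_cases hmem : half ∈ s
    · rw [if_pos heven, if_pos (by simpa using hmem)]
      have hmt : half ∈ t := (PySem.List.mem_sorted _ _ _ _).mpr hmem
      rw [PySem.List.remove?_eq_some_erase t half hmt]
      have := pv_loop_found t half (by omega) 0 (by simpa using hmt)
      simpa using this
    · rw [if_pos heven, if_neg (by simpa using hmem)]
      apply pv_loop_none
      · intro x hx hxs
        have : x = half := by omega
        exact hmem ((PySem.List.mem_sorted _ _ _ _).mp (this ▸ hx))
      · intro i hi
        have := (PySem.List.mem_pyRange_one).mp hi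
        omega
  · rw [if_neg heven]
    apply pv_loop_none
    · intro x hx hxs
      exact heven ((PySem.Int.mod_eq_zero_iff_dvd _ _).mpr ⟨x, by omega⟩)
    · intro i hi
      have := (PySem.List.mem_pyRange_one).mp hi
      omega
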